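-- pv_equiv track=rewrite | github.com/luandnh/CodeLearnTraining.Python | charactersInString.py | charactersInString
-- ===== SOURCE A (Python) =====
-- def charactersInString(n):
--     strChar = "ABCDEFGHIJKLMNOPQRSTUVWXYZ"
--     t = (n % (len(strChar))) - 1
--     if t == -1:
--         result = strChar[len(strChar) - 1]
--     else:
--         for i in range(len(strChar)):
--             if i == n - 1 or i == t:
--                 result = strChar[i]
--                 break
--     return result
-- ===== SOURCE B (Python) =====
-- def charactersInString(n):
--     strChar = "ABCDEFGHIJKLMNOPQRSTUVWXYZ"
--     return strChar[(n - 1) % 26]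
-- ===== Notes on version B (the rewrite author's own statement) =====
-- stated objective: simpler
-- what changed: Replaces A's linear scan over the 26 characters (with its n%26-1 sentinel, branch and break) by a single closed-form index strChar[(n-1)%26].
import Mathlib
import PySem

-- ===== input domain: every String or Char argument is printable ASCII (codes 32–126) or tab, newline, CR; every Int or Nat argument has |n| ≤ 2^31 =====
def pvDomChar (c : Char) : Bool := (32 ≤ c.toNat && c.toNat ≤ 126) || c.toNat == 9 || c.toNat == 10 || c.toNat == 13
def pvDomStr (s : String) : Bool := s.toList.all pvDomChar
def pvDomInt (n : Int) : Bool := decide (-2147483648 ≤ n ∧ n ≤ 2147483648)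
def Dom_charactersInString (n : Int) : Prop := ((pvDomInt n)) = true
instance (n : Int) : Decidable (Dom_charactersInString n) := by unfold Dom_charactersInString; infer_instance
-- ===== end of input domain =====

-- B replaces A's 26-step scan (with its n%26-1 sentinel, branch and break) by the
-- single closed-form index strChar[(n-1)%26]; same value for every integer n.


-- ===== PORT A =====
-- strChar[i]: Python returns a one-character string (index is in range wherever used)
def pvCharAt (s : String) (i : Int) : String :=
  ((PySem.Str.pyGet? s i).map (fun c => String.ofList [c])).getD ""

-- the `for i in range(len(strChar)) … break` loop; `none` = Python's unbound `result`
def pvLoopA (n t : Int) (s : String) : List Int → Option String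
  | [] => none
  | i :: rest => if i = n - 1 ∨ i = t then some (pvCharAt s i) else pvLoopA n t s rest

def pvStrChar : String := "ABCDEFGHIJKLMNOPQRSTUVWXYZ"

def charactersInString (n : Int) : String :=
  -- t = (n % len(strChar)) - 1
  if PySem.Int.mod n (PySem.Str.len pvStrChar) - 1 = -1 then
    pvCharAt pvStrChar (PySem.Str.len pvStrChar - 1)
  else
    (pvLoopA n (PySem.Int.mod n (PySem.Str.len pvStrChar) - 1) pvStrChar
      (PySem.List.pyRange 0 (PySem.Str.len pvStrChar) 1)).getD ""

-- ===== PORT B =====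
def charactersInString_alt (n : Int) : String :=
  pvCharAt pvStrChar (PySem.Int.mod (n - 1) 26)

-- ===== PRECONDITION & SPEC =====
def Spec_charactersInString (n : Int) (out : String) : Prop := out = charactersInString_alt n
instance (n : Int) (out : String) : Decidable (Spec_charactersInString n out) := by unfold Spec_charactersInString; infer_instance

-- ===== CLAIM (what is proved, stated in full; the proofs are below) =====
def Claim_equal_charactersInString : Prop := ∀ (n : Int), Dom_charactersInString n → Spec_charactersInString n (charactersInString n)

-- ===== LEMMAS AND PROOFS =====
-- the loop stops exactly at t when every admissible match in the remaining range equals t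
theorem pvLoopA_eq (n t : Int) (s : String) (l : List Int) (hmem : t ∈ l)
    (h : ∀ i ∈ l, i = n - 1 → i = t) :
    pvLoopA n t s l = some (pvCharAt s t) := by
  induction l with
  | nil => cases hmem
  | cons i rest ih =>
    by_cases hc : i = n - 1 ∨ i = t
    · have hit : i = t := by
        rcases hc with hc | hc
        · exact h i (List.mem_cons_self) hc
        · exact hc
      simp [pvLoopA, hit]
    · have hne : i ≠ t := fun h' => hc (Or.inr h')
      have hmem' : t ∈ rest := by
        rcases List.mem_cons.mp hmem with h' | h'
        · exact absurd h'.symm hne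
        · exact h'
      simp [pvLoopA, hc]
      exact ih hmem' (fun j hj => h j (List.mem_cons_of_mem _ hj))

theorem pysem_mod_26 (a : Int) : PySem.Int.mod a 26 = a % 26 :=
  PySem.Int.mod_eq_emod_of_pos (by norm_num)

-- ===== VERDICT (by name: the statement is the Claim_ definition above) =====
theorem charactersInString_spec : Claim_equal_charactersInString := by
  intro n _
  unfold Spec_charactersInString charactersInString charactersInString_alt
  have hlen : PySem.Str.len pvStrChar = 26 := by decide
  rw [hlen]
  rw [pysem_mod_26, pysem_mod_26]
  by_cases h0 : n % 26 - 1 = -1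
  · have : (n - 1) % 26 = 25 := by omega
    simp [h0, this]
  · have hr : 1 ≤ n % 26 ∧ n % 26 ≤ 25 := by
      have := Int.emod_nonneg n (by norm_num : (26:Int) ≠ 0)
      have := Int.emod_lt_of_pos n (by norm_num : (0:Int) < 26)
      omega
    have hmem : n % 26 - 1 ∈ PySem.List.pyRange 0 26 1 := by
      rw [PySem.List.mem_pyRange_one]; omega
    have hmatch : ∀ i ∈ PySem.List.pyRange 0 26 1, i = n - 1 → i = n % 26 - 1 := by
      intro i hi hieq
      rw [PySem.List.mem_pyRange_one] at hi
      omega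
    rw [if_neg h0, pvLoopA_eq n (n % 26 - 1) _ _ hmem hmatch]
    have ht : (n - 1) % 26 = n % 26 - 1 := by omega
    simp [ht]
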